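-- pv_equiv track=rewrite | github.com/steveroe317/covid-backend | query_jh.py | run_daily_filter
-- ===== SOURCE A (Python) =====
-- def run_daily_filter(source):
--   daily_result = {}
--   prev_value = 0
--   for source_key in sorted(source.keys()):
--     value = source[source_key]
--     daily_result[source_key] = value - prev_value
--     prev_value = value
--   return daily_result
-- ===== SOURCE B (Python) =====
-- def run_daily_filter(source):
--   keys = sorted(source.keys())
--   values = [source[k] for k in keys]
--   prevs = [0] + values[:-1]
--   return {k: v - p for k, v, p in zip(keys, values, prevs)}
-- ===== Notes on version B (the rewrite author's own statement) =====
-- stated objective: alternative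
-- what changed: Replaces the running prev_value accumulator threaded through the loop by a stateless adjacent-pair computation: pre-built sorted key and value lists, a predecessor list made by shifting the values right with a zero seed, and a zip comprehension.
import Mathlib
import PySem

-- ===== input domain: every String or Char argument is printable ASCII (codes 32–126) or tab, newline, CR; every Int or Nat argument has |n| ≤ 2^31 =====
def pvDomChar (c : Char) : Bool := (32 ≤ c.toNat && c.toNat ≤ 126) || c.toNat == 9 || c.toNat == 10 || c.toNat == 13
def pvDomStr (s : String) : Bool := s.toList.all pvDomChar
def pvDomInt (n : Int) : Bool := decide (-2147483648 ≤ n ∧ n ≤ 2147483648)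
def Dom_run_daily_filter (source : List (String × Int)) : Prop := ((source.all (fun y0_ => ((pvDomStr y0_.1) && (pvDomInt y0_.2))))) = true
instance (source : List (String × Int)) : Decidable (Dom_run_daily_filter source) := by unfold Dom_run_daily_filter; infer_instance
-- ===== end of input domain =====

-- B replaces A's running prev_value accumulator with a stateless adjacent-pair computation over
-- pre-built sorted key/value lists and a shifted predecessor list (alternative decomposition, same cost).


-- ===== PORT A =====
-- literal port of A: loop over sorted keys threading (result dict, prev_value)
def run_daily_filter (source : List (String × Int)) : List (String × Int) :=
  let src := PySem.Dict.ofList source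
  let st := (PySem.List.sorted src.keys (fun k => k) false).foldl
      (fun (st : PySem.Dict String Int × Int) source_key =>
        let value := src.getD source_key 0   -- source[source_key]: key comes from src.keys, always present
        (st.1.insert source_key (value - st.2), value))
      (PySem.Dict.empty, 0)
  st.1.items

-- ===== PORT B =====
-- literal port of Source B: sorted keys, values, shifted prevs [0]+values[:-1], zip comprehension
def run_daily_filter_alt (source : List (String × Int)) : List (String × Int) :=
  let src := PySem.Dict.ofList source
  let keys := PySem.List.sorted src.keys (fun k => k) false
  let values := keys.map (fun k => src.getD k 0)
  let prevs := 0 :: PySem.List.slice values none (some (-1))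
  ((keys.zip (values.zip prevs)).foldl
      (fun d kvp => d.insert kvp.1 (kvp.2.1 - kvp.2.2)) PySem.Dict.empty).items

-- ===== PRECONDITION & SPEC =====
def Spec_run_daily_filter (source : List (String × Int)) (out : List (String × Int)) : Prop := out = run_daily_filter_alt source
instance (source : List (String × Int)) (out : List (String × Int)) : Decidable (Spec_run_daily_filter source out) := by unfold Spec_run_daily_filter; infer_instance

-- ===== CLAIM (what is proved, stated in full; the proofs are below) =====
def Claim_equal_run_daily_filter : Prop := ∀ (source : List (String × Int)), Dom_run_daily_filter source → Spec_run_daily_filter source (run_daily_filter source)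

-- ===== LEMMAS AND PROOFS =====

-- the common result as a function of the key order and the lookup function
def pvBuild (g : String → Int) (p : Int) : List String → List (String × Int)
  | [] => []
  | k :: t => (k, g k - p) :: pvBuild g (g k) t

-- A's loop computes pvBuild, provided the keys are fresh and distinct
theorem pvA_loop (g : String → Int) (ks : List String) (d : PySem.Dict String Int) (p : Int)
    (hnd : ks.Nodup) (hfresh : ∀ k ∈ ks, d.contains k = false) :
    ((ks.foldl (fun (st : PySem.Dict String Int × Int) k => (st.1.insert k (g k - st.2), g k)) (d, p)).1).items
      = d.items ++ pvBuild g p ks := by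
  induction ks generalizing d p with
  | nil => simp [pvBuild]
  | cons k t ih =>
      simp only [List.foldl_cons, pvBuild]
      rw [ih (d.insert k (g k - p)) (g k) hnd.of_cons]
      · rw [PySem.Dict.items_insert_of_not_contains d (g k - p) (hfresh k (by simp))]
        simp
      · intro k' hk'
        rw [PySem.Dict.contains_insert]
        have : k' ≠ k := fun h => (List.nodup_cons.mp hnd).1 (h ▸ hk')
        simp [this, hfresh k' (List.mem_cons_of_mem _ hk')]

-- values[:-1] is dropLast
theorem pvSlice_dropLast (xs : List Int) : PySem.List.slice xs none (some (-1)) = xs.dropLast := by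
  simp [PySem.List.slice, PySem.List.clampIdx, List.dropLast_eq_take]
  cases xs <;> simp

-- B's zip over (keys, values, shifted values) is pvBuild
theorem pvZip_build (g : String → Int) (p : Int) (ks : List String) :
    ((ks.zip ((ks.map g).zip (p :: (ks.map g).dropLast))).map
        (fun kvp => (kvp.1, kvp.2.1 - kvp.2.2))) = pvBuild g p ks := by
  induction ks generalizing p with
  | nil => rfl
  | cons k t ih =>
      cases t with
      | nil => rfl
      | cons k' t' =>
          have h := ih (g k)
          simp only [List.map_cons, List.dropLast_cons₂, List.zip_cons_cons] at h ⊢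
          rw [pvBuild, ← h]

-- first components of B's zipped list are exactly ks
theorem pvZip_fst (g : String → Int) (ks : List String) (p : Int) :
    ((ks.zip ((ks.map g).zip (p :: (ks.map g).dropLast))).map Prod.fst) = ks := by
  apply List.map_fst_zip
  cases ks with
  | nil => simp
  | cons k t => simp [List.length_zip, List.length_dropLast]

-- A's loop body and B's list pipeline agree for any dict with distinct keys
theorem pvCore (src : PySem.Dict String Int) (h1 : src.keys.Nodup) :
    ((PySem.List.sorted src.keys (fun k => k) false).foldl
        (fun (st : PySem.Dict String Int × Int) k =>
          (st.1.insert k (src.getD k 0 - st.2), src.getD k 0)) (PySem.Dict.empty, 0)).1.items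
    = (((PySem.List.sorted src.keys (fun k => k) false).zip
          (((PySem.List.sorted src.keys (fun k => k) false).map (fun k => src.getD k 0)).zip
            (0 :: PySem.List.slice ((PySem.List.sorted src.keys (fun k => k) false).map (fun k => src.getD k 0)) none (some (-1))))).foldl
        (fun d (kvp : String × Int × Int) => d.insert kvp.1 (kvp.2.1 - kvp.2.2)) PySem.Dict.empty).items := by
  set ks := PySem.List.sorted src.keys (fun k => k) false with hks
  set g : String → Int := fun k => src.getD k 0 with hg
  have hnd : ks.Nodup := ((PySem.List.sorted_perm src.keys (fun k => k) false).nodup_iff).mpr h1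
  rw [pvA_loop g ks PySem.Dict.empty 0 hnd (fun k _ => PySem.Dict.contains_empty k)]
  rw [pvSlice_dropLast]
  have hndz : ((ks.zip ((ks.map g).zip (0 :: (ks.map g).dropLast))).map Prod.fst).Nodup := by
    rw [pvZip_fst g ks 0]; exact hnd
  rw [PySem.Dict.items_foldl_insert_fresh _ _ _ _ (fun a _ => PySem.Dict.contains_empty a.1) hndz]
  rw [pvZip_build g 0 ks]

-- ===== VERDICT (by name: the statement is the Claim_ definition above) =====
theorem run_daily_filter_spec : Claim_equal_run_daily_filter := by
  intro source _
  unfold Spec_run_daily_filter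
  exact pvCore (PySem.Dict.ofList source) (PySem.Dict.nodup_keys_ofList source)
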